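-- pv_equiv track=rewrite | github.com/dgdg1013/Cycle-planner | desktop/app.py | compute_goal_status
-- ===== SOURCE A (Python) =====
-- def compute_goal_status(works):
--     if not works:
--         return "NOT_STARTED"
--     if all(w["status"] == "NOT_STARTED" for w in works):
--         return "NOT_STARTED"
--     if all(w["status"] == "DONE" for w in works):
--         return "DONE"
--     return "IN_PROGRESS"
-- ===== SOURCE B (Python) =====
-- def compute_goal_status(works):
--     total = done = not_started = 0
--     for w in works:
--         s = w["status"]
--         total += 1
--         if s == "DONE":
--             done += 1
--         elif s == "NOT_STARTED":
--             not_started += 1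
--     if total == 0 or not_started == total:
--         return "NOT_STARTED"
--     if done == total:
--         return "DONE"
--     return "IN_PROGRESS"
-- ===== Notes on version B (the rewrite author's own statement) =====
-- stated objective: alternative
-- what changed: B makes one pass accumulating three counters (total, done, not_started) and decides the status by comparing counts, instead of A's early-return chain of two short-circuiting all() passes.
-- outside the precondition, e.g. on compute_goal_status([{'status': 'X'}, {}]): A returns 'IN_PROGRESS', B raises KeyError
import Mathlib
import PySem

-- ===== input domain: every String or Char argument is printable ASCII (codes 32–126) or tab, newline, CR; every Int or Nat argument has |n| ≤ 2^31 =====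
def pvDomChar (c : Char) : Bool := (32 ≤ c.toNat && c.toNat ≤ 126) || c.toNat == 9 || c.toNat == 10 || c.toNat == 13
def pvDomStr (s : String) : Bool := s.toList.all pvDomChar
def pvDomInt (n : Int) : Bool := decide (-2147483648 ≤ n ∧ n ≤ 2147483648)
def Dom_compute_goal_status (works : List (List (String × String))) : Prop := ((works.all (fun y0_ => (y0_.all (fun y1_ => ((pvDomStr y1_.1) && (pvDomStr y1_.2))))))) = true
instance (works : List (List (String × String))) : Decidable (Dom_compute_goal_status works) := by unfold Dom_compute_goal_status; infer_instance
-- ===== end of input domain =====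

-- B makes one pass accumulating three counters (total, done, not_started) and decides by
-- comparing counts, instead of A's early-return chain of two short-circuiting all() passes.

-- ===== PORT A =====
-- w["status"] : first-match lookup in the association list; total form (default "") is
-- exact under Pre_, which guarantees the key is present in every dict.
def pvStatus (w : List (String × String)) : String :=
  ((w.find? (fun p => p.1 == "status")).map Prod.snd).getD ""

def compute_goal_status (works : List (List (String × String))) : String :=
  if works.isEmpty then "NOT_STARTED"
  else if works.all (fun w => pvStatus w == "NOT_STARTED") then "NOT_STARTED"
  else if works.all (fun w => pvStatus w == "DONE") then "DONE"
  else "IN_PROGRESS"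

-- ===== PORT B =====
def pvCountStep (a : Int × Int × Int) (w : List (String × String)) : Int × Int × Int :=
  let s := pvStatus w
  if s == "DONE" then (a.1 + 1, a.2.1 + 1, a.2.2)
  else if s == "NOT_STARTED" then (a.1 + 1, a.2.1, a.2.2 + 1)
  else (a.1 + 1, a.2.1, a.2.2)

def compute_goal_status_alt (works : List (List (String × String))) : String :=
  let acc := works.foldl pvCountStep (0, 0, 0)
  if acc.1 == 0 || acc.2.2 == acc.1 then "NOT_STARTED"
  else if acc.2.1 == acc.1 then "DONE"
  else "IN_PROGRESS"

-- ===== PRECONDITION & SPEC =====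
-- Pre_ excludes inputs where some dict lacks a "status" key: B's full pass always raises
-- KeyError there, while A sometimes returns early only because its all() short-circuits.
def Pre_compute_goal_status (works : List (List (String × String))) : Prop :=
  (works.all (fun w => w.any (fun p => p.1 == "status"))) = true
instance (works : List (List (String × String))) : Decidable (Pre_compute_goal_status works) := by unfold Pre_compute_goal_status; infer_instance
def pvWitness_compute_goal_status : (List (List (String × String))) :=
  [[("status", "DONE")], [("status", "NOT_STARTED"), ("title", "a")]]
def Spec_compute_goal_status (works : List (List (String × String))) (out : String) : Prop := out = compute_goal_status_alt works
instance (works : List (List (String × String))) (out : String) : Decidable (Spec_compute_goal_status works out) := by unfold Spec_compute_goal_status; infer_instance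

-- ===== CLAIM =====
def Claim_equal_compute_goal_status : Prop := ∀ (works : List (List (String × String))), Dom_compute_goal_status works → Pre_compute_goal_status works → Spec_compute_goal_status works (compute_goal_status works)

-- ===== LEMMAS AND PROOFS =====
lemma foldl_count (works : List (List (String × String))) (t d n : Int) :
    works.foldl pvCountStep (t, d, n) =
      (t + works.length,
       d + (works.countP (fun w => pvStatus w == "DONE") : Int),
       n + (works.countP (fun w => pvStatus w == "NOT_STARTED") : Int)) := by
  induction works generalizing t d n with
  | nil => simp
  | cons w ws ih =>
    simp only [List.foldl_cons, pvCountStep, List.length_cons, List.countP_cons]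
    by_cases h1 : pvStatus w = "DONE"
    · simp only [h1, beq_self_eq_true, if_true, ih]
      have hf : (("DONE" : String) == "NOT_STARTED") = false := by decide
      simp only [hf, Prod.mk.injEq]
      refine ⟨by push_cast; ring, by push_cast; ring, by push_cast; ring⟩
    · have h1' : (pvStatus w == "DONE") = false := by simp [h1]
      by_cases h2 : pvStatus w = "NOT_STARTED"
      · have h2' : (pvStatus w == "NOT_STARTED") = true := by simp [h2]
        simp only [h1', h2', if_true, if_false, Bool.false_eq_true, ih, Prod.mk.injEq]
        refine ⟨by push_cast; ring, by push_cast; ring, by push_cast; ring⟩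
      · have h2' : (pvStatus w == "NOT_STARTED") = false := by simp [h2]
        simp only [h1', h2', if_false, Bool.false_eq_true, ih, Prod.mk.injEq]
        refine ⟨by push_cast; ring, by push_cast; ring, by push_cast; ring⟩

lemma all_iff_countP (L : List (List (String × String))) (p : List (String × String) → Bool) :
    (L.all p = true) ↔ ((L.countP p : Int) = L.length) := by
  rw [List.all_eq_true]
  constructor
  · intro h
    have : L.countP p = L.length := List.countP_eq_length.2 h
    exact_mod_cast this
  · intro h
    have : L.countP p = L.length := by exact_mod_cast h
    exact List.countP_eq_length.1 this

-- ===== VERDICT =====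
theorem compute_goal_status_spec : Claim_equal_compute_goal_status := by
  intro works _ _
  unfold Spec_compute_goal_status compute_goal_status compute_goal_status_alt
  rw [foldl_count]
  rcases works with _ | ⟨w, ws⟩
  · simp
  · have hNS := all_iff_countP (w :: ws) (fun x => pvStatus x == "NOT_STARTED")
    have hD := all_iff_countP (w :: ws) (fun x => pvStatus x == "DONE")
    simp only [List.isEmpty_cons, Bool.false_eq_true, if_false, zero_add,
      Bool.or_eq_true, beq_iff_eq]
    simp only [hNS, hD, List.length_cons] at *
    push_cast at *
    split_ifs <;> first | rfl | (exfalso; omega)
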